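-- pv_equiv track=rewrite | github.com/nickschatz/toycpu | asm_to_machine.py | asm_to_machine
-- ===== SOURCE A (Python) =====
-- def asm_to_machine(asm, ram_size):
--     # Map for register literals to machine code ids
--     regmap = {"0": 0, "1": 1, "A": 2, "B": 3, "C": 4, "D": 5, "E": 6, "F": 7, "G": 8}
--     instrmap = {"nop": 0x0,
--                 "stop": 0x1,
--                 "jump": 0x2,
--                 "load": 0x3,
--                 "store": 0x4,
--                 "move": 0x5,
--                 "add": 0x6,
--                 "sub": 0x7,
--                 "mul": 0x8,
--                 "div": 0x9,
--                 "fadd": 0xA,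
--                 "fsub": 0xB,
--                 "fmul": 0xC,
--                 "fdiv": 0xD,
--                 "eq": 0xE,
--                 "gt": 0xF,
--                 "lt": 0x10,
--                 "gte": 0x11,
--                 "lte": 0x12,
--                 "or": 0x13,
--                 "and": 0x14,
--                 "xor": 0x15,
--                 "not": 0x16,}
--     labelmap = {}
--     machine = []
--
--     # Find memory locations of labels
--     memloc = ram_size
--     for line in asm:
--         if len(line) == 0 or line[0] == ";":
--             continue
--         if line.endswith(":"):
--             labelmap[line[:-1]] = memloc
--         else:
--             memloc += 4
--     for line in asm:
--         # Ignore blank lines, comments, and labels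
--         if len(line) == 0 or line[0] == ";" or line.endswith(":"):
--             continue
--         machine_line = []
--         data = line.split(" ")
--         # Get the instruction
--         machine_line += [instrmap[data[0]]]
--         for dat in data[1:]:
--             # Parse each op part
--             if dat.startswith(":"):
--                 # Label
--                 machine_line += [labelmap[dat[1:]]]
--             elif dat in regmap:
--                 # Register
--                 machine_line += [regmap[dat]]
--             else:
--                 # Literal
--                 machine_line += [int(dat, base=16)]
--         # Pad into 4 byte word
--         machine_line += [0] * (4-len(machine_line))
--         machine += machine_line
--     return machine
-- ===== SOURCE B (Python) =====
-- def asm_to_machine(asm, ram_size):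
--     # Single-pass assembler with backpatching: instead of a first pass that
--     # only computes label addresses and a second pass that encodes, we encode
--     # in ONE scan, emitting a placeholder 0 for each label operand while
--     # recording a fixup (position, label); label definitions are entered into
--     # labelmap as they are met, and after the scan every fixup slot is patched.
--     # Forward references work because patching happens after the scan.
--     regmap = {"0": 0, "1": 1, "A": 2, "B": 3, "C": 4, "D": 5, "E": 6, "F": 7, "G": 8}
--     instrmap = {"nop": 0x0, "stop": 0x1, "jump": 0x2, "load": 0x3, "store": 0x4,
--                 "move": 0x5, "add": 0x6, "sub": 0x7, "mul": 0x8, "div": 0x9,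
--                 "fadd": 0xA, "fsub": 0xB, "fmul": 0xC, "fdiv": 0xD, "eq": 0xE,
--                 "gt": 0xF, "lt": 0x10, "gte": 0x11, "lte": 0x12, "or": 0x13,
--                 "and": 0x14, "xor": 0x15, "not": 0x16}
--     labelmap = {}
--     machine = []
--     fixups = []  # (absolute index into machine, label name)
--     memloc = ram_size
--     for line in asm:
--         if len(line) == 0 or line[0] == ";":
--             continue
--         if line.endswith(":"):
--             labelmap[line[:-1]] = memloc
--             continue
--         toks = line.split(" ")
--         word = [instrmap[toks[0]]]
--         for dat in toks[1:]:
--             if dat.startswith(":"):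
--                 fixups.append((len(machine) + len(word), dat[1:]))
--                 word.append(0)
--             elif dat in regmap:
--                 word.append(regmap[dat])
--             else:
--                 word.append(int(dat, base=16))
--         word += [0] * (4 - len(word))
--         machine += word
--         memloc += 4
--     for i, name in fixups:
--         machine[i] = labelmap[name]
--     return machine
-- ===== Notes on version B (the rewrite author's own statement) =====
-- stated objective: alternative
-- what changed: B assembles in a single scan with backpatching: it encodes each instruction immediately, emitting a placeholder 0 for every label operand and recording a (position,label) fixup, and patches the fixup slots from the label table after the scan, instead of A's two full passes over the source (one to place labels, one to encode).
import Mathlib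
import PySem

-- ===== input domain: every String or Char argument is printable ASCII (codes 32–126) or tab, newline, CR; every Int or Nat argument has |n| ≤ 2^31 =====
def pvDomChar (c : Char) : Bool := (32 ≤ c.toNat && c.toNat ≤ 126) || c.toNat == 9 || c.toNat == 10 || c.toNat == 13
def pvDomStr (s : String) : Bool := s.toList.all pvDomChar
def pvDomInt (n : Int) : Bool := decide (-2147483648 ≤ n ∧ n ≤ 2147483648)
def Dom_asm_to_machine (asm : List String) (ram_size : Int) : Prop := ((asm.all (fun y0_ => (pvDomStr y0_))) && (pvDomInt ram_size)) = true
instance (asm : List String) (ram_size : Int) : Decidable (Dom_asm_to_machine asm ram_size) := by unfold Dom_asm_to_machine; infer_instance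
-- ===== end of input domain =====

-- B is a single-pass assembler with backpatching (placeholder 0 for label operands, fixups patched
-- after the scan) instead of A's two passes over the source (objective: alternative; same cost).

-- ===== PORT A =====
def pvRegmap : PySem.Dict String Int :=
  PySem.Dict.ofList [("0", 0), ("1", 1), ("A", 2), ("B", 3), ("C", 4), ("D", 5), ("E", 6), ("F", 7), ("G", 8)]

def pvInstrmap : PySem.Dict String Int :=
  PySem.Dict.ofList [("nop", 0x0), ("stop", 0x1), ("jump", 0x2), ("load", 0x3), ("store", 0x4),
    ("move", 0x5), ("add", 0x6), ("sub", 0x7), ("mul", 0x8), ("div", 0x9), ("fadd", 0xA),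
    ("fsub", 0xB), ("fmul", 0xC), ("fdiv", 0xD), ("eq", 0xE), ("gt", 0xF), ("lt", 0x10),
    ("gte", 0x11), ("lte", 0x12), ("or", 0x13), ("and", 0x14), ("xor", 0x15), ("not", 0x16)]

-- first loop of A: find memory locations of labels
def pvPass1Step (st : PySem.Dict String Int × Int) (line : String) : PySem.Dict String Int × Int :=
  if PySem.Str.len line == 0 || PySem.Str.pyGet? line 0 == some ';' then st
  else if PySem.Str.endswith line ":" then
    (st.1.insert (PySem.Str.slice line none (some (-1))) st.2, st.2)
  else (st.1, st.2 + 4)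

-- body of the inner 'for dat in data[1:]' loop of A; labelmap[...]/int(dat,16) KeyError/ValueError
-- are excluded by Pre_, where Python raises the total form appends the default 0
def pvOpStep (labelmap : PySem.Dict String Int) (ml : List Int) (dat : String) : List Int :=
  if PySem.Str.startswith dat ":" then
    ml ++ [labelmap.getD (PySem.Str.slice dat (some 1) none) 0]
  else if pvRegmap.contains dat then ml ++ [pvRegmap.getD dat 0]
  else ml ++ [(PySem.Int.ofStrBase? dat 16).getD 0]

-- body of A's second loop (labelmap fixed)
def pvPass2Step (labelmap : PySem.Dict String Int) (machine : List Int) (line : String) : List Int :=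
  if PySem.Str.len line == 0 || PySem.Str.pyGet? line 0 == some ';' || PySem.Str.endswith line ":" then
    machine
  else
    let data := (PySem.Str.split? line " ").getD []
    let machine_line := [pvInstrmap.getD (data.getD 0 "") 0]
    let machine_line := (data.drop 1).foldl (pvOpStep labelmap) machine_line
    let machine_line := machine_line ++ List.replicate (4 - machine_line.length) 0
    machine ++ machine_line

def asm_to_machine (asm : List String) (ram_size : Int) : List Int :=
  let p := asm.foldl pvPass1Step (PySem.Dict.empty, ram_size)
  asm.foldl (pvPass2Step p.1) []

-- ===== PORT B =====
-- inner operand loop of B: state (word, fixups); a label operand emits placeholder 0 and records a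
-- fixup at absolute index base + len(word)
def pvBOpStep (base : Nat) (st : List Int × List (Nat × String)) (dat : String) :
    List Int × List (Nat × String) :=
  if PySem.Str.startswith dat ":" then
    (st.1 ++ [0], st.2 ++ [(base + st.1.length, PySem.Str.slice dat (some 1) none)])
  else if pvRegmap.contains dat then (st.1 ++ [pvRegmap.getD dat 0], st.2)
  else (st.1 ++ [(PySem.Int.ofStrBase? dat 16).getD 0], st.2)

-- B's single scan: state (machine, fixups, labelmap, memloc)
def pvBLineStep (st : List Int × List (Nat × String) × PySem.Dict String Int × Int)
    (line : String) : List Int × List (Nat × String) × PySem.Dict String Int × Int :=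
  if PySem.Str.len line == 0 || PySem.Str.pyGet? line 0 == some ';' then st
  else if PySem.Str.endswith line ":" then
    (st.1, st.2.1, st.2.2.1.insert (PySem.Str.slice line none (some (-1))) st.2.2.2, st.2.2.2)
  else
    let toks := (PySem.Str.split? line " ").getD []
    let wf := (toks.drop 1).foldl (pvBOpStep st.1.length)
               ([pvInstrmap.getD (toks.getD 0 "") 0], st.2.1)
    let word := wf.1 ++ List.replicate (4 - wf.1.length) 0
    (st.1 ++ word, wf.2, st.2.2.1, st.2.2.2 + 4)

-- final backpatch loop of B: machine[i] = labelmap[name] (KeyError excluded by Pre_)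
def pvPatch (labelmap : PySem.Dict String Int) (machine : List Int)
    (fixups : List (Nat × String)) : List Int :=
  fixups.foldl (fun m p => m.set p.1 (labelmap.getD p.2 0)) machine

def asm_to_machine_alt (asm : List String) (ram_size : Int) : List Int :=
  let st := asm.foldl pvBLineStep ([], [], PySem.Dict.empty, ram_size)
  pvPatch st.2.2.1 st.1 st.2.1

-- ===== PRECONDITION & SPEC =====
-- the labels defined anywhere in the program (key set of the final labelmap)
def pvLabels (asm : List String) : List String :=
  asm.filterMap (fun line =>
    if PySem.Str.len line == 0 || PySem.Str.pyGet? line 0 == some ';' then none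
    else if PySem.Str.endswith line ":" then some (PySem.Str.slice line none (some (-1)))
    else none)

def pvOpNames : List String :=
  ["nop", "stop", "jump", "load", "store", "move", "add", "sub", "mul", "div", "fadd", "fsub",
   "fmul", "fdiv", "eq", "gt", "lt", "gte", "lte", "or", "and", "xor", "not"]

def pvRegNames : List String := ["0", "1", "A", "B", "C", "D", "E", "F", "G"]

def pvLineOK (labels : List String) (line : String) : Bool :=
  (PySem.Str.len line == 0 || PySem.Str.pyGet? line 0 == some ';' || PySem.Str.endswith line ":") ||
  (let data := (PySem.Str.split? line " ").getD []
   pvOpNames.contains (data.getD 0 "") &&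
   (data.drop 1).all (fun dat =>
     if PySem.Str.startswith dat ":" then labels.contains (PySem.Str.slice dat (some 1) none)
     else pvRegNames.contains dat || (PySem.Int.ofStrBase? dat 16).isSome))

-- Pre_ excludes exactly the inputs on which A raises: an instruction line whose mnemonic is not an
-- opcode (KeyError), a ':'-operand naming a label defined nowhere (KeyError), or a literal operand
-- that is not a valid base-16 integer (ValueError).
def Pre_asm_to_machine (asm : List String) (ram_size : Int) : Prop :=
  asm.all (pvLineOK (pvLabels asm)) = true

instance (asm : List String) (ram_size : Int) : Decidable (Pre_asm_to_machine asm ram_size) := by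
  unfold Pre_asm_to_machine; infer_instance

def pvWitness_asm_to_machine : List String × Int :=
  (["start:", "; loop forever", "add A B", "", "jump :start"], 16)

def Spec_asm_to_machine (asm : List String) (ram_size : Int) (out : List Int) : Prop := out = asm_to_machine_alt asm ram_size
instance (asm : List String) (ram_size : Int) (out : List Int) : Decidable (Spec_asm_to_machine asm ram_size out) := by unfold Spec_asm_to_machine; infer_instance

-- ===== CLAIM (what is proved, stated in full; the proofs are below) =====
def Claim_equal_asm_to_machine : Prop := ∀ (asm : List String) (ram_size : Int), Dom_asm_to_machine asm ram_size → Pre_asm_to_machine asm ram_size → Spec_asm_to_machine asm ram_size (asm_to_machine asm ram_size)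

-- ===== LEMMAS AND PROOFS =====

-- the A-side value of one operand under a fixed labelmap
def pvResolve (L : PySem.Dict String Int) (dat : String) : Int :=
  if PySem.Str.startswith dat ":" then L.getD (PySem.Str.slice dat (some 1) none) 0
  else if pvRegmap.contains dat then pvRegmap.getD dat 0
  else (PySem.Int.ofStrBase? dat 16).getD 0

theorem opStep_eq (L : PySem.Dict String Int) (ml : List Int) (dat : String) :
    pvOpStep L ml dat = ml ++ [pvResolve L dat] := by
  unfold pvOpStep pvResolve; split_ifs <;> rfl

theorem innerA_eq (L : PySem.Dict String Int) (l : List String) :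
    ∀ (ml : List Int), l.foldl (pvOpStep L) ml = ml ++ l.map (pvResolve L) := by
  induction l with
  | nil => intro ml; simp
  | cons dat rest ih =>
    intro ml; rw [List.foldl_cons, opStep_eq, ih, List.map_cons]; simp

-- the placeholder suffix and fixups B's inner loop produces, as explicit functions of the
-- current word length k and line base
def pvTail (base : Nat) : Nat → List String → List Int × List (Nat × String)
  | _, [] => ([], [])
  | k, dat :: rest =>
    let t := pvTail base (k + 1) rest
    if PySem.Str.startswith dat ":" then
      (0 :: t.1, (base + k, PySem.Str.slice dat (some 1) none) :: t.2)
    else if pvRegmap.contains dat then (pvRegmap.getD dat 0 :: t.1, t.2)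
    else ((PySem.Int.ofStrBase? dat 16).getD 0 :: t.1, t.2)

theorem pvTail_cons (base k : Nat) (dat : String) (rest : List String) :
    pvTail base k (dat :: rest)
      = (if PySem.Str.startswith dat ":" then
          (0 :: (pvTail base (k + 1) rest).1,
           (base + k, PySem.Str.slice dat (some 1) none) :: (pvTail base (k + 1) rest).2)
         else if pvRegmap.contains dat then
          (pvRegmap.getD dat 0 :: (pvTail base (k + 1) rest).1, (pvTail base (k + 1) rest).2)
         else
          ((PySem.Int.ofStrBase? dat 16).getD 0 :: (pvTail base (k + 1) rest).1,
           (pvTail base (k + 1) rest).2)) := rfl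

theorem innerB_eq (base : Nat) (toks : List String) :
    ∀ (w : List Int) (fx : List (Nat × String)),
      toks.foldl (pvBOpStep base) (w, fx)
        = (w ++ (pvTail base w.length toks).1, fx ++ (pvTail base w.length toks).2) := by
  induction toks with
  | nil => intro w fx; simp [pvTail]
  | cons dat rest ih =>
    intro w fx
    rw [List.foldl_cons]
    by_cases h1 : PySem.Str.startswith dat ":" = true
    · rw [show pvBOpStep base (w, fx) dat
          = (w ++ [0], fx ++ [(base + w.length, PySem.Str.slice dat (some 1) none)]) by
        unfold pvBOpStep; rw [if_pos h1]]
      rw [ih]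
      rw [pvTail_cons, if_pos h1]
      simp
    · by_cases h2 : pvRegmap.contains dat = true
      · rw [show pvBOpStep base (w, fx) dat = (w ++ [pvRegmap.getD dat 0], fx) by
          unfold pvBOpStep; rw [if_neg h1, if_pos h2]]
        rw [ih]
        rw [pvTail_cons, if_neg h1, if_pos h2]
        simp
      · rw [show pvBOpStep base (w, fx) dat
            = (w ++ [(PySem.Int.ofStrBase? dat 16).getD 0], fx) by
          unfold pvBOpStep; rw [if_neg h1, if_neg h2]]
        rw [ih]
        rw [pvTail_cons, if_neg h1, if_neg h2]
        simp

theorem pvTail_len (base : Nat) (toks : List String) :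
    ∀ k, (pvTail base k toks).1.length = toks.length := by
  induction toks with
  | nil => intro k; simp [pvTail]
  | cons dat rest ih =>
    intro k; unfold pvTail; split_ifs <;> simp [ih]

theorem set_append_left {v : Int} (a b : List Int) (i : Nat) (h : i < a.length) :
    (a ++ b).set i v = a.set i v ++ b := by
  rw [List.set_append]; simp [h]

theorem set_append_right {v : Int} (a b : List Int) :
    (a ++ b).set a.length v = a ++ b.set 0 v := by
  rw [List.set_append]; simp

theorem pvPatch_cons (L : PySem.Dict String Int) (m : List Int) (p : Nat × String)
    (fx : List (Nat × String)) :
    pvPatch L m (p :: fx) = pvPatch L (m.set p.1 (L.getD p.2 0)) fx := rfl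

theorem set_mid (pre w t pad : List Int) (v : Int) :
    (pre ++ w ++ (0 :: t) ++ pad).set (pre.length + w.length) v
      = pre ++ (w ++ [v]) ++ t ++ pad := by
  have h : pre ++ w ++ ((0 : Int) :: t) ++ pad = (pre ++ w) ++ ((0 : Int) :: (t ++ pad)) := by simp
  rw [h, show pre.length + w.length = (pre ++ w).length by simp, set_append_right]
  simp

-- patching the line's own fixups turns the placeholder word into A's resolved word
theorem patch_line (L : PySem.Dict String Int) (toks : List String) :
    ∀ (pre w pad : List Int),
      pvPatch L (pre ++ w ++ (pvTail pre.length w.length toks).1 ++ pad)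
        (pvTail pre.length w.length toks).2
      = pre ++ w ++ toks.map (pvResolve L) ++ pad := by
  induction toks with
  | nil => intro pre w pad; simp [pvTail, pvPatch]
  | cons dat rest ih =>
    intro pre w pad
    rw [pvTail_cons]
    by_cases h1 : PySem.Str.startswith dat ":" = true
    · rw [if_pos h1]
      rw [pvPatch_cons]
      rw [show ((pre ++ w ++
            ((0 : Int) :: (pvTail pre.length (w.length + 1) rest).1) ++ pad).set
            (pre.length + w.length) (L.getD (PySem.Str.slice dat (some 1) none) 0))
          = pre ++ (w ++ [L.getD (PySem.Str.slice dat (some 1) none) 0]) ++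
              (pvTail pre.length (w.length + 1) rest).1 ++ pad from
        set_mid pre w _ pad _]
      have h := ih pre (w ++ [L.getD (PySem.Str.slice dat (some 1) none) 0]) pad
      simp only [List.length_append, List.length_cons, List.length_nil, Nat.zero_add] at h
      rw [h]
      have h1' : PySem.Chars.startswith dat.toList [':'] = true := by
        simpa [PySem.Str.startswith] using h1
      simp [pvResolve, h1']
    · by_cases h2 : pvRegmap.contains dat = true
      · rw [if_neg h1, if_pos h2]
        rw [show pre ++ w ++ (pvRegmap.getD dat 0 :: (pvTail pre.length (w.length + 1) rest).1) ++ pad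
            = pre ++ (w ++ [pvRegmap.getD dat 0]) ++ (pvTail pre.length (w.length + 1) rest).1 ++ pad
            by simp]
        have h := ih pre (w ++ [pvRegmap.getD dat 0]) pad
        simp only [List.length_append, List.length_cons, List.length_nil, Nat.zero_add] at h
        rw [h]
        have h1' : ¬ PySem.Chars.startswith dat.toList [':'] = true := by
          simpa [PySem.Str.startswith] using h1
        simp [pvResolve, h1', h2]
      · rw [if_neg h1, if_neg h2]
        rw [show pre ++ w ++ ((PySem.Int.ofStrBase? dat 16).getD 0 :: (pvTail pre.length (w.length + 1) rest).1) ++ pad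
            = pre ++ (w ++ [(PySem.Int.ofStrBase? dat 16).getD 0]) ++ (pvTail pre.length (w.length + 1) rest).1 ++ pad
            by simp]
        have h := ih pre (w ++ [(PySem.Int.ofStrBase? dat 16).getD 0]) pad
        simp only [List.length_append, List.length_cons, List.length_nil, Nat.zero_add] at h
        rw [h]
        have h1' : ¬ PySem.Chars.startswith dat.toList [':'] = true := by
          simpa [PySem.Str.startswith] using h1
        simp [pvResolve, h1', h2]

theorem patch_append (L : PySem.Dict String Int) (fx1 fx2 : List (Nat × String)) (m : List Int) :
    pvPatch L m (fx1 ++ fx2) = pvPatch L (pvPatch L m fx1) fx2 := by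
  unfold pvPatch; rw [List.foldl_append]

theorem patch_length (L : PySem.Dict String Int) (fx : List (Nat × String)) :
    ∀ m : List Int, (pvPatch L m fx).length = m.length := by
  induction fx with
  | nil => intro m; rfl
  | cons p rest ih =>
    intro m
    show (pvPatch L (m.set p.1 _) rest).length = _
    rw [ih]; simp

theorem patch_low (L : PySem.Dict String Int) (fx : List (Nat × String)) :
    ∀ (m w : List Int), (∀ p ∈ fx, p.1 < m.length) →
      pvPatch L (m ++ w) fx = pvPatch L m fx ++ w := by
  induction fx with
  | nil => intro m w _; rfl
  | cons p rest ih =>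
    intro m w h
    show pvPatch L ((m ++ w).set p.1 _) rest = pvPatch L (m.set p.1 _) rest ++ w
    rw [set_append_left _ _ _ (h p (by simp))]
    exact ih _ w (fun q hq => by rw [List.length_set]; exact h q (by simp [hq]))

-- the labelmap/memloc component of B's scan evolves exactly as A's first pass
theorem scan_lm_eq (asm : List String) :
    ∀ (m : List Int) (fx : List (Nat × String)) (d : PySem.Dict String Int) (loc : Int),
      (asm.foldl pvBLineStep (m, fx, d, loc)).2.2 = asm.foldl pvPass1Step (d, loc) := by
  induction asm with
  | nil => intro m fx d loc; rfl
  | cons line rest ih =>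
    intro m fx d loc
    rw [List.foldl_cons, List.foldl_cons]
    unfold pvBLineStep pvPass1Step
    split_ifs <;> simp only [] <;> exact ih _ _ _ _

-- main invariant: patching the final fixups with the final labelmap L yields A's second pass
theorem scan_main (L : PySem.Dict String Int) (asm : List String) :
    ∀ (m : List Int) (fx : List (Nat × String)) (d : PySem.Dict String Int) (loc : Int),
      (∀ p ∈ fx, p.1 < m.length) →
      pvPatch L (asm.foldl pvBLineStep (m, fx, d, loc)).1
        (asm.foldl pvBLineStep (m, fx, d, loc)).2.1
      = asm.foldl (pvPass2Step L) (pvPatch L m fx) := by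
  induction asm with
  | nil => intro m fx d loc _; rfl
  | cons line rest ih =>
    intro m fx d loc hfx
    rw [List.foldl_cons, List.foldl_cons]
    by_cases hskip : PySem.Str.len line == 0 || PySem.Str.pyGet? line 0 == some ';'
    · rw [show pvBLineStep (m, fx, d, loc) line = (m, fx, d, loc) by
          unfold pvBLineStep; rw [if_pos hskip],
        show pvPass2Step L (pvPatch L m fx) line = pvPatch L m fx by
          unfold pvPass2Step
          rw [if_pos (show (PySem.Str.len line == 0 || PySem.Str.pyGet? line 0 == some ';'
              || PySem.Str.endswith line ":") = true by
            rcases Bool.or_eq_true_iff.1 hskip with h | h <;> rw [h] <;> simp)]]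
      exact ih m fx d loc hfx
    · by_cases hlab : PySem.Str.endswith line ":"
      · rw [show pvBLineStep (m, fx, d, loc) line
              = (m, fx, d.insert (PySem.Str.slice line none (some (-1))) loc, loc) by
            unfold pvBLineStep; rw [if_neg (by exact hskip), if_pos hlab],
          show pvPass2Step L (pvPatch L m fx) line = pvPatch L m fx by
            unfold pvPass2Step
            rw [if_pos (show (PySem.Str.len line == 0 || PySem.Str.pyGet? line 0 == some ';'
                || PySem.Str.endswith line ":") = true by rw [hlab]; simp)]]
        exact ih m fx _ loc hfx
      · -- instruction line
        set toks := (PySem.Str.split? line " ").getD [] with htoks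
        have hstep : pvBLineStep (m, fx, d, loc) line =
            (m ++ ((([pvInstrmap.getD (toks.getD 0 "") 0] : List Int)
                ++ (pvTail m.length 1 (toks.drop 1)).1)
                ++ List.replicate (3 - (toks.drop 1).length) 0),
             fx ++ (pvTail m.length 1 (toks.drop 1)).2, d, loc + 4) := by
          unfold pvBLineStep
          rw [if_neg (by exact hskip), if_neg hlab]
          simp only [← htoks, innerB_eq, List.length_cons, List.length_nil]
          simp [pvTail_len]
        rw [hstep]
        have hA : pvPass2Step L (pvPatch L m fx) line
            = pvPatch L m fx ++ (([pvInstrmap.getD (toks.getD 0 "") 0] : List Int)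
                ++ (toks.drop 1).map (pvResolve L)
                ++ List.replicate (3 - (toks.drop 1).length) 0) := by
          unfold pvPass2Step
          rw [if_neg (by simp [hskip, hlab] at *; tauto)]
          simp only [← htoks, innerA_eq]
          simp
        rw [ih _ _ d (loc + 4) ?hidx]
        · congr 1
          rw [patch_append]
          have hlow := patch_low L fx m
            ([pvInstrmap.getD (toks.getD 0 "") 0] ++ (pvTail m.length 1 (toks.drop 1)).1
              ++ List.replicate (3 - (toks.drop 1).length) 0) hfx
          rw [hlow]
          have hpl := patch_line L (toks.drop 1) (pvPatch L m fx)
            [pvInstrmap.getD (toks.getD 0 "") 0]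
            (List.replicate (3 - (toks.drop 1).length) 0)
          rw [hA]
          rw [patch_length] at hpl
          simpa using hpl
        · case hidx =>
          intro p hp
          have e1 : (pvTail m.length 1 (toks.drop 1)).1.length = (toks.drop 1).length :=
            pvTail_len _ _ _
          -- fixups produced by this line sit inside the appended word
          have hrange : ∀ (tl : List String) (b k : Nat) (q : Nat × String),
                q ∈ (pvTail b k tl).2 → b + k ≤ q.1 ∧ q.1 < b + k + tl.length := by
              intro tl
              induction tl with
              | nil => intro b k q hq; simp [pvTail] at hq
              | cons dat r ihr =>
                intro b k q hq
                unfold pvTail at hq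
                split_ifs at hq with h1 h2
                · rcases List.mem_cons.1 hq with rfl | hq'
                  · simp
                  · have := ihr b (k + 1) q hq'; simp at this ⊢; omega
                · have := ihr b (k + 1) q hq; simp at this ⊢; omega
                · have := ihr b (k + 1) q hq; simp at this ⊢; omega
          rcases List.mem_append.1 hp with h | h
          · have := hfx p h
            simp only [List.length_append, List.length_cons, List.length_nil,
              List.length_replicate, e1]
            omega
          · have := hrange (toks.drop 1) m.length 1 p h
            simp only [List.length_append, List.length_cons, List.length_nil,
              List.length_replicate, e1]
            omega

-- ===== VERDICT (by name: the statement is the Claim_ definition above) =====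
theorem asm_to_machine_spec : Claim_equal_asm_to_machine := by
  intro asm ram_size _ _
  show List.foldl (pvPass2Step (List.foldl pvPass1Step (PySem.Dict.empty, ram_size) asm).1) [] asm
      = pvPatch (List.foldl pvBLineStep ([], [], PySem.Dict.empty, ram_size) asm).2.2.1
          (List.foldl pvBLineStep ([], [], PySem.Dict.empty, ram_size) asm).1
          (List.foldl pvBLineStep ([], [], PySem.Dict.empty, ram_size) asm).2.1
  rw [scan_lm_eq]
  exact (scan_main (List.foldl pvPass1Step (PySem.Dict.empty, ram_size) asm).1 asm
    [] [] PySem.Dict.empty ram_size (by simp)).symm
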